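-- pv_equiv track=rewrite | github.com/hongwang600/Meta-MINERVA | data.py | tokenize_relation
-- ===== SOURCE A (Python) =====
-- def tokenize_relation(rel):
--     tokens = []
--     relations = rel.split('.')
--     for this_relation in relations:
--         for _ in this_relation.split('/')[-3:]:
--             tokens+=(_.split('_'))
--         tokens.append('[SEP]')
--     return tokens[:-1]
-- ===== SOURCE B (Python) =====
-- def tokenize_relation(rel):
--     # Single left-to-right character scan with a sliding window of the last
--     # up-to-3 '/'-segments; no split()/slicing passes at all.
--     out = []
--     win = []   # last <=3 completed '/'-segments of the current relation (each a list of subtokens)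
--     seg = []   # subtokens of the current '/'-segment
--     cur = []   # characters of the current '_'-subtoken
--     started = False
--     for ch in rel:
--         if ch == '.':
--             seg.append(''.join(cur))
--             win.append(seg)
--             if len(win) > 3:
--                 win.pop(0)
--             if started:
--                 out.append('[SEP]')
--             for s in win:
--                 out.extend(s)
--             win, seg, cur = [], [], []
--             started = True
--         elif ch == '/':
--             seg.append(''.join(cur))
--             win.append(seg)
--             if len(win) > 3:
--                 win.pop(0)
--             seg, cur = [], []
--         elif ch == '_':
--             seg.append(''.join(cur))
--             cur = []
--         else:
--             cur.append(ch)
--     seg.append(''.join(cur))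
--     win.append(seg)
--     if len(win) > 3:
--         win.pop(0)
--     if started:
--         out.append('[SEP]')
--     for s in win:
--         out.extend(s)
--     return out
-- ===== Notes on version B (the rewrite author's own statement) =====
-- stated objective: alternative
-- what changed: B replaces A's three staged split passes (split '.', take the last 3 of split '/', split '_', append a separator per relation and trim it with [:-1]) by a single left-to-right character scan: a state machine over the characters that maintains the current subtoken, the current '/'-segment and a sliding window of the last up-to-3 segments, flushing the window (with a separator if anything was emitted before) at each '.' and at the end.
import Mathlib
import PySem

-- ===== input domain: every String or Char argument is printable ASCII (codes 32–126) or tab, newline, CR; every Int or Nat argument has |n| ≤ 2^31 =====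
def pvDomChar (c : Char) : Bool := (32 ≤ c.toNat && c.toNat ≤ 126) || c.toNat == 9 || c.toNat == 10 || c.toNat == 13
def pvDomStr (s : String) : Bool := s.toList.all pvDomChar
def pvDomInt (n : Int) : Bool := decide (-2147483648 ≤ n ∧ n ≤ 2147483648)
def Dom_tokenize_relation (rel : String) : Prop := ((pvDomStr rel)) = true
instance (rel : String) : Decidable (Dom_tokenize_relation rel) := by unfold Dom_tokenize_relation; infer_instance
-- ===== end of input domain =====

-- B replaces A's three nested split passes (split '.', slice [-3:] of split '/', split '_',
-- then trim the trailing separator) by a single left-to-right character scan that maintains a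
-- sliding window of the last up-to-3 '/'-segments and flushes it at each '.' (alternative).

-- ===== PORT A =====
-- 'x.split(sep)' with the literal nonempty separators '.', '/', '_' never raises, so '.getD []' is exact.
def tokenize_relation (rel : String) : List String :=
  let tokens : List String := []
  let relations := (PySem.Str.split? rel ".").getD []
  let tokens := relations.foldl (fun tokens this_relation =>
    let tokens := (PySem.List.slice ((PySem.Str.split? this_relation "/").getD []) (some (-3)) none).foldl
        (fun tokens u => tokens ++ (PySem.Str.split? u "_").getD []) tokens
    tokens ++ ["[SEP]"]) tokens
  PySem.List.slice tokens none (some (-1))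

-- ===== PORT B =====
-- state = (out, win, seg, cur, started); ''.join(cur) = String.ofList cur; win.pop(0) = win.tail
def pvStep (st : List String × List (List String) × List String × List Char × Bool)
    (ch : Char) : List String × List (List String) × List String × List Char × Bool :=
  match st with
  | (out, win, seg, cur, started) =>
    if ch = '.' then
      let seg := seg ++ [String.ofList cur]
      let win := win ++ [seg]
      let win := if win.length > 3 then win.tail else win
      let out := if started then out ++ ["[SEP]"] else out
      let out := win.foldl (fun o s => o ++ s) out
      (out, [], [], [], true)
    else if ch = '/' then
      let seg := seg ++ [String.ofList cur]
      let win := win ++ [seg]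
      let win := if win.length > 3 then win.tail else win
      (out, win, [], [], started)
    else if ch = '_' then
      (out, win, seg ++ [String.ofList cur], [], started)
    else
      (out, win, seg, cur ++ [ch], started)

def tokenize_relation_alt (rel : String) : List String :=
  match rel.toList.foldl pvStep ([], [], [], [], false) with
  | (out, win, seg, cur, started) =>
    let seg := seg ++ [String.ofList cur]
    let win := win ++ [seg]
    let win := if win.length > 3 then win.tail else win
    let out := if started then out ++ ["[SEP]"] else out
    win.foldl (fun o s => o ++ s) out

-- ===== PRECONDITION & SPEC =====
def Spec_tokenize_relation (rel : String) (out : List String) : Prop := out = tokenize_relation_alt rel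
instance (rel : String) (out : List String) : Decidable (Spec_tokenize_relation rel out) := by unfold Spec_tokenize_relation; infer_instance

-- ===== CLAIM (what is proved, stated in full; the proofs are below) =====
def Claim_equal_tokenize_relation : Prop := ∀ (rel : String), Dom_tokenize_relation rel → Spec_tokenize_relation rel (tokenize_relation rel)

-- ===== LEMMAS AND PROOFS =====

-- single-character split, head-recursive (proved equal to PySem's splitOn below)
def myS (c : Char) : List Char → List (List Char)
  | [] => [[]]
  | x :: xs =>
    if x = c then [] :: myS c xs
    else
      match myS c xs with
      | [] => [[x]]
      | h :: t => (x :: h) :: t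

theorem myS_ne_nil (c : Char) (l : List Char) : myS c l ≠ [] := by
  cases l with
  | nil => simp [myS]
  | cons x xs =>
    simp only [myS]
    split_ifs
    · simp
    · cases h : myS c xs <;> simp

def consH (p : List Char) : List (List Char) → List (List Char)
  | [] => [p]
  | h :: t => (p ++ h) :: t

theorem go_eq_myS (c : Char) (fuel : Nat) (l cur : List Char) (acc : List (List Char))
    (hf : l.length ≤ fuel) :
    PySem.Chars.splitOn.go [c] fuel l cur acc = acc.reverse ++ consH cur.reverse (myS c l) := by
  induction fuel generalizing l cur acc with
  | zero =>
    have : l = [] := List.eq_nil_of_length_eq_zero (Nat.le_zero.mp hf)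
    subst this
    simp [PySem.Chars.splitOn.go, myS, consH]
  | succ n ih =>
    cases l with
    | nil => simp [PySem.Chars.splitOn.go, myS, consH]
    | cons x xs =>
      rw [PySem.Chars.splitOn.go]
      by_cases hx : x = c
      · subst hx
        rw [if_pos (by simp)]
        rw [ih _ _ _ (by simpa using Nat.le_of_succ_le_succ hf)]
        cases h : myS x xs with
        | nil => exact absurd h (myS_ne_nil x xs)
        | cons h' t => simp [myS, consH, h]
      · rw [if_neg (by simp [List.isPrefixOf]; exact fun h => absurd h.symm hx)]
        rw [ih _ _ _ (by simpa using Nat.le_of_succ_le_succ hf)]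
        cases h : myS c xs with
        | nil => exact absurd h (myS_ne_nil c xs)
        | cons h' t => simp [myS, consH, h, hx]

theorem splitOn_eq_myS (c : Char) (l : List Char) :
    PySem.Chars.splitOn l [c] = myS c l := by
  rw [PySem.Chars.splitOn, go_eq_myS c _ l [] [] (by omega)]
  cases h : myS c l with
  | nil => exact absurd h (myS_ne_nil c l)
  | cons h' t => simp [consH]

theorem split?_eq_myS (s : String) (c : Char) (sep : String) (hsep : sep.toList = [c]) :
    (PySem.Str.split? s sep).getD [] = (myS c s.toList).map String.ofList := by
  rw [PySem.Str.split?, PySem.Chars.split?, hsep]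
  simp [splitOn_eq_myS]

-- keep the last (up to) 3 elements
def trim3 {α : Type} (l : List α) : List α := l.drop (l.length - 3)

theorem tail_eq_trim3 {α : Type} (l : List α) (h : l.length = 4) : l.tail = trim3 l := by
  unfold trim3
  rw [h]
  simp [List.drop_one]

theorem trim3_of_le {α : Type} (l : List α) (h : l.length ≤ 3) : trim3 l = l := by
  unfold trim3
  rw [Nat.sub_eq_zero_of_le h, List.drop_zero]

theorem length_trim3_le {α : Type} (l : List α) : (trim3 l).length ≤ 3 := by
  unfold trim3; rw [List.length_drop]; omega

theorem my_drop_append {α : Type} (a b : List α) (n : Nat) :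
    (a ++ b).drop n = a.drop n ++ b.drop (n - a.length) := by
  induction a generalizing n with
  | nil => simp
  | cons x xs ih =>
    cases n with
    | zero => simp
    | succ m => simp [ih m]

theorem trim3_append_trim3 {α : Type} (a b : List α) :
    trim3 (trim3 a ++ b) = trim3 (a ++ b) := by
  by_cases h : a.length ≤ 3
  · rw [trim3_of_le a h]
  · unfold trim3
    rw [List.length_append, List.length_append, List.length_drop,
        my_drop_append, my_drop_append, List.drop_drop, List.length_drop]
    congr 2 <;> omega

theorem trim3_map {α β : Type} (f : α → β) (l : List α) :
    trim3 (l.map f) = (trim3 l).map f := by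
  unfold trim3
  rw [List.length_map, List.map_drop]

-- spec-side views of the scanner state
def toksFrom (cur : List Char) (p : List Char) : List String :=
  match myS '_' p with
  | [] => []
  | t :: ts => String.ofList (cur ++ t) :: ts.map String.ofList

def toks (p : List Char) : List String := (myS '_' p).map String.ofList

def segsFrom (seg : List String) (cur : List Char) (r : List Char) : List (List String) :=
  match myS '/' r with
  | [] => []
  | p :: ps => (seg ++ toksFrom cur p) :: ps.map toks

def groupFrom (win : List (List String)) (seg : List String) (cur : List Char)
    (r : List Char) : List String :=
  (trim3 (win ++ segsFrom seg cur r)).flatten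

def groupB (r : List Char) : List String := groupFrom [] [] [] r

def inter : List (List String) → List String
  | [] => []
  | g :: gs => g ++ gs.flatMap (fun g => "[SEP]" :: g)

def contRels (win : List (List String)) (seg : List String) (cur : List Char) :
    List (List Char) → List (List String)
  | [] => []
  | r :: rs => groupFrom win seg cur r :: rs.map groupB

theorem toksFrom_nil (p : List Char) : toksFrom [] p = toks p := by
  unfold toksFrom toks
  cases h : myS '_' p with
  | nil => simp
  | cons t ts => simp

theorem segsFrom_nil (r : List Char) : segsFrom [] [] r = (myS '/' r).map toks := by
  unfold segsFrom
  cases h : myS '/' r with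
  | nil => simp
  | cons p ps => simp [toksFrom_nil]

theorem contRels_nil (rs : List (List Char)) : contRels [] [] [] rs = rs.map groupB := by
  cases rs with
  | nil => rfl
  | cons r rs' => rfl

theorem foldl_extend (l : List (List String)) : ∀ (a : List String),
    l.foldl (fun o s => o ++ s) a = a ++ l.flatten := by
  induction l with
  | nil => simp
  | cons h t ih =>
    intro a
    rw [List.foldl_cons, ih]
    simp [List.append_assoc]

-- the flush performed at '.' and at end-of-string
theorem flush_eq (out : List String) (win : List (List String)) (seg : List String)
    (cur : List Char) (h : win.length ≤ 3) :
    ((if (win ++ [seg ++ [String.ofList cur]]).length > 3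
        then (win ++ [seg ++ [String.ofList cur]]).tail
        else win ++ [seg ++ [String.ofList cur]]).foldl (fun o s => o ++ s) out)
      = out ++ groupFrom win seg cur [] := by
  have hseg : segsFrom seg cur [] = [seg ++ [String.ofList cur]] := by
    simp [segsFrom, myS, toksFrom]
  unfold groupFrom
  rw [hseg]
  have htrim : (if (win ++ [seg ++ [String.ofList cur]]).length > 3
      then (win ++ [seg ++ [String.ofList cur]]).tail
      else win ++ [seg ++ [String.ofList cur]]) = trim3 (win ++ [seg ++ [String.ofList cur]]) := by
    split_ifs with hgt
    · exact tail_eq_trim3 _ (by simp at hgt ⊢; omega)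
    · exact (trim3_of_le _ (by simp at hgt ⊢; omega)).symm
  rw [htrim, foldl_extend]

-- the one-step group lemmas
theorem groupFrom_slash (win : List (List String)) (seg : List String) (cur : List Char)
    (h : List Char) :
    groupFrom win seg cur ('/' :: h)
      = groupFrom (trim3 (win ++ [seg ++ [String.ofList cur]])) [] [] h := by
  unfold groupFrom
  rw [segsFrom_nil, trim3_append_trim3]
  congr 1
  unfold segsFrom
  have : myS '/' ('/' :: h) = [] :: myS '/' h := by simp [myS]
  rw [this]
  cases hm : myS '/' h with
  | nil => exact absurd hm (myS_ne_nil _ _)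
  | cons p ps =>
    simp [toksFrom, myS, List.append_assoc]

theorem groupFrom_under (win : List (List String)) (seg : List String) (cur : List Char)
    (h : List Char) :
    groupFrom win seg cur ('_' :: h) = groupFrom win (seg ++ [String.ofList cur]) [] h := by
  unfold groupFrom segsFrom
  cases hm : myS '/' h with
  | nil => exact absurd hm (myS_ne_nil _ _)
  | cons p ps =>
    have : myS '/' ('_' :: h) = ('_' :: p) :: ps := by
      simp [myS, hm]
    rw [this]
    dsimp only
    have ht : toksFrom cur ('_' :: p) = String.ofList cur :: toksFrom [] p := by
      unfold toksFrom
      cases hp : myS '_' p with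
      | nil => exact absurd hp (myS_ne_nil _ _)
      | cons t ts => simp [myS, hp]
    rw [ht]
    simp [List.append_assoc]

theorem groupFrom_char (win : List (List String)) (seg : List String) (cur : List Char)
    (x : Char) (h : List Char) (hx1 : x ≠ '/') (hx2 : x ≠ '_') :
    groupFrom win seg cur (x :: h) = groupFrom win seg (cur ++ [x]) h := by
  unfold groupFrom segsFrom
  cases hm : myS '/' h with
  | nil => exact absurd hm (myS_ne_nil _ _)
  | cons p ps =>
    have : myS '/' (x :: h) = (x :: p) :: ps := by
      simp [myS, hm, hx1]
    rw [this]
    dsimp only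
    have ht : toksFrom cur (x :: p) = toksFrom (cur ++ [x]) p := by
      unfold toksFrom
      cases hp : myS '_' p with
      | nil => exact absurd hp (myS_ne_nil _ _)
      | cons t ts => simp [myS, hp, hx2, List.append_assoc]
    rw [ht]

-- the finish step applied to a scanner state (matches tokenize_relation_alt's epilogue)
def fin : List String × List (List String) × List String × List Char × Bool → List String
  | (out, win, seg, cur, started) =>
    let seg := seg ++ [String.ofList cur]
    let win := win ++ [seg]
    let win := if win.length > 3 then win.tail else win
    let out := if started then out ++ ["[SEP]"] else out
    win.foldl (fun o s => o ++ s) out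

-- the scanner invariant
theorem scan_eq (cs : List Char) : ∀ (out : List String) (win : List (List String))
    (seg : List String) (cur : List Char) (started : Bool), win.length ≤ 3 →
    fin (cs.foldl pvStep (out, win, seg, cur, started))
    = (if started then out ++ ["[SEP]"] else out)
      ++ inter (contRels win seg cur (myS '.' cs)) := by
  induction cs with
  | nil =>
    intro out win seg cur started hw
    have : myS '.' ([] : List Char) = [[]] := rfl
    rw [List.foldl_nil, this]
    show ((if (win ++ [seg ++ [String.ofList cur]]).length > 3
        then (win ++ [seg ++ [String.ofList cur]]).tail
        else win ++ [seg ++ [String.ofList cur]]).foldl (fun o s => o ++ s)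
        (if started then out ++ ["[SEP]"] else out)) = _
    rw [flush_eq _ _ _ _ hw]
    simp [contRels, inter]
  | cons x xs ih =>
    intro out win seg cur started hw
    rw [List.foldl_cons]
    by_cases hdot : x = '.'
    · subst hdot
      show fin (xs.foldl pvStep
        (((if (win ++ [seg ++ [String.ofList cur]]).length > 3
            then (win ++ [seg ++ [String.ofList cur]]).tail
            else win ++ [seg ++ [String.ofList cur]]).foldl (fun o s => o ++ s)
            (if started then out ++ ["[SEP]"] else out)), [], [], [], true)) = _
      rw [ih _ _ _ _ _ (by simp), flush_eq _ _ _ _ hw]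
      have hms : myS '.' ('.' :: xs) = [] :: myS '.' xs := by simp [myS]
      rw [hms, contRels_nil]
      cases hr : myS '.' xs with
      | nil => exact absurd hr (myS_ne_nil _ _)
      | cons r rs =>
        simp [contRels, inter, List.flatMap_cons, List.append_assoc]
    · have hms : ∃ h t, myS '.' xs = h :: t ∧ myS '.' (x :: xs) = (x :: h) :: t := by
        cases hr : myS '.' xs with
        | nil => exact absurd hr (myS_ne_nil _ _)
        | cons h t => exact ⟨h, t, rfl, by simp [myS, hdot, hr]⟩
      obtain ⟨h, t, hxs, hcons⟩ := hms
      by_cases hsl : x = '/'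
      · subst hsl
        show fin (xs.foldl pvStep
          ((out, (if (win ++ [seg ++ [String.ofList cur]]).length > 3
              then (win ++ [seg ++ [String.ofList cur]]).tail
              else win ++ [seg ++ [String.ofList cur]]), [], [], started))) = _
        have htrim : (if (win ++ [seg ++ [String.ofList cur]]).length > 3
            then (win ++ [seg ++ [String.ofList cur]]).tail
            else win ++ [seg ++ [String.ofList cur]])
            = trim3 (win ++ [seg ++ [String.ofList cur]]) := by
          split_ifs with hgt
          · exact tail_eq_trim3 _ (by simp at hgt ⊢; omega)
          · exact (trim3_of_le _ (by simp at hgt ⊢; omega)).symm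
        rw [htrim, ih _ _ _ _ _ (length_trim3_le _), hcons, hxs]
        simp only [contRels]
        rw [groupFrom_slash]
      · by_cases hun : x = '_'
        · subst hun
          show fin (xs.foldl pvStep (out, win, seg ++ [String.ofList cur], [], started)) = _
          rw [ih _ _ _ _ _ hw, hcons, hxs]
          simp only [contRels]
          rw [groupFrom_under]
        · have hstep : pvStep (out, win, seg, cur, started) x
              = (out, win, seg, cur ++ [x], started) := by
            simp [pvStep, hdot, hsl, hun]
          rw [hstep, ih _ _ _ _ _ hw, hcons, hxs]
          simp only [contRels]
          rw [groupFrom_char _ _ _ _ _ hsl hun]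

-- ===== the A side =====
def subA (r : String) : List String :=
  (PySem.List.slice ((PySem.Str.split? r "/").getD []) (some (-3)) none).flatMap
    (fun u => (PySem.Str.split? u "_").getD [])

theorem flatMap_sep_ne_nil (g : List String) (gs : List (List String)) :
    (g :: gs).flatMap (fun g => g ++ ["[SEP]"]) ≠ [] := by
  simp [List.flatMap_cons]

theorem dropLast_flatMap_sep (g : List String) (gs : List (List String)) :
    ((g :: gs).flatMap (fun g => g ++ ["[SEP]"])).dropLast
      = g ++ gs.flatMap (fun g => "[SEP]" :: g) := by
  induction gs generalizing g with
  | nil => simp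
  | cons g' rest ih =>
    rw [List.flatMap_cons, List.append_assoc,
        List.dropLast_append_of_ne_nil (by simp [List.flatMap_cons]),
        List.dropLast_append_of_ne_nil (flatMap_sep_ne_nil g' rest), ih g']
    simp

theorem subA_ofList (r : List Char) : subA (String.ofList r) = groupB r := by
  unfold subA groupB groupFrom
  rw [split?_eq_myS _ '/' _ (by decide), PySem.List.slice_from_neg_ofNat _ 3 (by omega),
      segsFrom_nil]
  simp only [String.toList_ofList, List.nil_append]
  show (trim3 ((myS '/' r).map String.ofList)).flatMap _ = _
  rw [trim3_map, List.flatMap_map, trim3_map]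
  have hfl : ∀ (m : List (List Char)), (m.map toks).flatten = m.flatMap toks := by
    intro m
    induction m with
    | nil => simp
    | cons a t ih => simp [ih]
  rw [hfl]
  congr 1
  funext p
  show (PySem.Str.split? (String.ofList p) "_").getD [] = toks p
  rw [split?_eq_myS _ '_' _ (by decide), String.toList_ofList]
  rfl

theorem A_eq_inter (rel : String) :
    tokenize_relation rel = inter (((PySem.Str.split? rel ".").getD []).map subA) := by
  unfold tokenize_relation
  have hfold : ∀ (l : List String) (acc : List String),
      l.foldl (fun tokens this_relation =>
        (PySem.List.slice ((PySem.Str.split? this_relation "/").getD []) (some (-3)) none).foldl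
          (fun tokens u => tokens ++ (PySem.Str.split? u "_").getD []) tokens ++ ["[SEP]"]) acc
        = acc ++ l.flatMap (fun r => subA r ++ ["[SEP]"]) := by
    intro l
    induction l with
    | nil => simp
    | cons y ys ihy =>
      intro acc
      rw [List.foldl_cons, ihy]
      simp only [subA, PySem.List.foldl_append_eq_flatMap,
        List.flatMap_cons, List.append_assoc]
  cases hr : (PySem.Str.split? rel ".").getD [] with
  | nil => simp [PySem.List.slice_to_neg_one, inter]
  | cons r rs =>
    simp only [hfold, List.nil_append, PySem.List.slice_to_neg_one]
    have hm : List.flatMap (fun r => subA r ++ ["[SEP]"]) (r :: rs)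
        = List.flatMap (fun g => g ++ ["[SEP]"]) (List.map subA (r :: rs)) := by
      simp [List.flatMap_map]
    rw [hm, List.map_cons, dropLast_flatMap_sep]
    simp [inter]

-- ===== VERDICT (by name: the statement is the Claim_ definition above) =====
theorem tokenize_relation_spec : Claim_equal_tokenize_relation := by
  intro rel _
  unfold Spec_tokenize_relation
  rw [A_eq_inter]
  have halt : tokenize_relation_alt rel
      = fin (rel.toList.foldl pvStep ([], [], [], [], false)) := by
    unfold tokenize_relation_alt fin
    rfl
  rw [halt, scan_eq _ _ _ _ _ _ (by simp), contRels_nil]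
  rw [split?_eq_myS _ '.' _ (by decide)]
  rw [List.map_map]
  have hcomp : subA ∘ String.ofList = groupB := funext fun r => subA_ofList r
  rw [hcomp]
  simp
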